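-- pv_equiv track=rewrite | github.com/MorSalo/PyAss | ass4/allSums.py | allSumsDP
-- ===== SOURCE A (Python) =====
-- def allSumsDP(arr):
--     helper = set()
--     helper.add(0)
--     helper.add(arr[len(arr)-1])
--     for i in range(len(arr) - 2, -1, -1):
--         x = arr[i]
--         nw = set(helper)
--         for j in nw:
--             helper.add(x+j)
--         helper.add(x)
--     return helper
-- ===== SOURCE B (Python) =====
-- def allSumsDP(arr):
--     if len(arr) <= 1:
--         return {0, arr[0]}
--     rest = allSumsDP(arr[1:])
--     return rest | {arr[0] + s for s in rest}
-- ===== Notes on version B (the rewrite author's own statement) =====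
-- stated objective: simpler
-- what changed: Replaces the explicit backward index loop with set-copy per step by a structural recursion on the list tail combining head with the tail's subset-sum set via a union with a comprehension.
import Mathlib
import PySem

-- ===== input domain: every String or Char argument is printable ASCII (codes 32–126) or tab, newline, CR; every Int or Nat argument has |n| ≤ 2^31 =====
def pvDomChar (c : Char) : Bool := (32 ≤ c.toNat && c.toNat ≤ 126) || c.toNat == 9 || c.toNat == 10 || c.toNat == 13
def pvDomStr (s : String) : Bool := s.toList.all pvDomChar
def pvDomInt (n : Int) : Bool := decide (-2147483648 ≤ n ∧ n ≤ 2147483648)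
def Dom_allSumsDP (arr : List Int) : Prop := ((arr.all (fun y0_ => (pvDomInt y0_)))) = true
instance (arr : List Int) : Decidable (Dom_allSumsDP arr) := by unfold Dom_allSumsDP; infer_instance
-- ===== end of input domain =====

-- B replaces A's explicit backward index loop (copying the set each step) by a structural
-- recursion on the list tail; same exact subset-sum set, no speed claim.

-- ===== PORT A =====
-- literal transliteration of A: seed {0, arr[-1]}, then for i from len-2 down to 0
-- copy the set and add x+j for each j, then add x.
def allSumsDP (arr : List Int) : List Int :=
  let helper : PySem.Set Int := PySem.Set.empty
  let helper := PySem.Set.add helper 0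
  let helper := PySem.Set.add helper (PySem.List.pyGetD arr ((arr.length : Int) - 1) 0)
  (PySem.List.pyRange ((arr.length : Int) - 2) (-1) (-1)).foldl
    (fun helper i =>
      let x := PySem.List.pyGetD arr i 0
      let nw := PySem.Set.ofList helper
      let helper := nw.foldl (fun h j => PySem.Set.add h (x + j)) helper
      PySem.Set.add helper x)
    helper

-- ===== PORT B =====
-- literal transliteration of Source B: recursion on the tail; base {0, arr[0]};
-- step: rest | {arr[0] + s for s in rest}.
def allSumsDP_alt : List Int → List Int
  | [] => [0]          -- Python B raises IndexError here (excluded by Pre_)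
  | [x] => PySem.Set.add (PySem.Set.add PySem.Set.empty 0) x
  | x :: y :: tl =>
      let rest := allSumsDP_alt (y :: tl)
      PySem.Set.union rest (rest.map (fun s => x + s))

-- ===== PRECONDITION & SPEC =====
-- A raises IndexError on the empty list (arr[len(arr)-1]); so does B (arr[0]).
def Pre_allSumsDP (arr : List Int) : Prop := arr ≠ []
instance (arr : List Int) : Decidable (Pre_allSumsDP arr) := by unfold Pre_allSumsDP; infer_instance
def pvWitness_allSumsDP : List Int := [1, 2, 3]

def Spec_allSumsDP (arr : List Int) (out : List Int) : Prop := out = allSumsDP_alt arr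
instance (arr : List Int) (out : List Int) : Decidable (Spec_allSumsDP arr out) := by unfold Spec_allSumsDP; infer_instance

-- ===== CLAIM (what is proved, stated in full; the proofs are below) =====
def Claim_equal_allSumsDP : Prop := ∀ (arr : List Int), Dom_allSumsDP arr → Pre_allSumsDP arr → Spec_allSumsDP arr (allSumsDP arr)

-- ===== LEMMAS AND PROOFS =====

-- A's loop body as a named function (proof helper; definitionally the port's body)
def stepA (arr : List Int) (helper : List Int) (i : Int) : List Int :=
  let x := PySem.List.pyGetD arr i 0
  let nw := PySem.Set.ofList helper
  PySem.Set.add (nw.foldl (fun h j => PySem.Set.add h (x + j)) helper) x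

theorem allSumsDP_eq_foldl (arr : List Int) :
    allSumsDP arr =
      (PySem.List.pyRange ((arr.length : Int) - 2) (-1) (-1)).foldl (stepA arr)
        (PySem.Set.add (PySem.Set.add PySem.Set.empty 0)
          (PySem.List.pyGetD arr ((arr.length : Int) - 1) 0)) := rfl

-- 0 is always in B's result
theorem zero_mem_alt (arr : List Int) : (0 : Int) ∈ allSumsDP_alt arr := by
  induction arr with
  | nil => simp [allSumsDP_alt]
  | cons x tl ih =>
    cases tl with
    | nil => simp [allSumsDP_alt, PySem.Set.mem_add, PySem.Set.empty]
    | cons y tl' =>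
      simp only [allSumsDP_alt, PySem.Set.mem_union]
      exact Or.inl ih

-- B's result has no duplicates
theorem nodup_alt (arr : List Int) : (allSumsDP_alt arr).Nodup := by
  induction arr with
  | nil => simp [allSumsDP_alt]
  | cons x tl ih =>
    cases tl with
    | nil =>
      exact PySem.Set.nodup_add _ _ (PySem.Set.nodup_add _ _ (by simp [PySem.Set.empty]))
    | cons y tl' =>
      exact PySem.Set.nodup_union _ _ ih

-- B's recursion step, with the union unfolded to a fold of adds
theorem alt_cons (x y : Int) (tl : List Int) :
    allSumsDP_alt (x :: y :: tl) =
      (allSumsDP_alt (y :: tl)).foldl (fun h j => PySem.Set.add h (x + j)) (allSumsDP_alt (y :: tl)) := by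
  show PySem.Set.union _ _ = _
  show List.foldl _ _ (List.map _ _) = _
  rw [List.foldl_map]

-- countdown range(m,-1,-1) = (range(m-1,-1,-1) shifted up by 1) ++ [0]
theorem pyRange_countdown_split (m : Int) (hm : 0 ≤ m) :
    PySem.List.pyRange m (-1) (-1) =
      (PySem.List.pyRange (m - 1) (-1) (-1)).map (fun j => j + 1) ++ [0] := by
  rw [PySem.List.pyRange_neg_one, PySem.List.pyRange_neg_one]
  have h1 : (m - -1).toNat = (m - 1 - -1).toNat + 1 := by omega
  rw [h1, List.range_succ]
  simp only [List.map_append, List.map_map, List.map_cons, List.map_nil]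
  congr 1
  · exact List.map_congr_left (fun k _ => by simp only [Function.comp_apply]; ring)
  · simp only [List.cons.injEq, and_true]
    omega

-- A's loop body at index j+1 on x::rest equals the body at index j on rest, for j ≥ 0
theorem pyGetD_cons_shift (x : Int) (rest : List Int) (j : Int) (hj : 0 ≤ j) :
    PySem.List.pyGetD (x :: rest) (j + 1) 0 = PySem.List.pyGetD rest j 0 := by
  rw [PySem.List.pyGetD_of_nonneg _ _ (by omega : (0:Int) ≤ j + 1),
      PySem.List.pyGetD_of_nonneg _ _ hj]
  have h : (j + 1).toNat = j.toNat + 1 := by omega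
  simp [h]

theorem stepA_cons_shift (x : Int) (rest : List Int) (s : List Int) (j : Int) (hj : 0 ≤ j) :
    stepA (x :: rest) s (j + 1) = stepA rest s j := by
  unfold stepA
  rw [pyGetD_cons_shift _ _ _ hj]

theorem stepA_zero (x : Int) (rest : List Int) (s : List Int) :
    stepA (x :: rest) s 0 =
      PySem.Set.add ((PySem.Set.ofList s).foldl (fun h j => PySem.Set.add h (x + j)) s) x := by
  unfold stepA
  simp [PySem.List.pyGetD]

-- shifting A's whole loop down one list element
theorem foldl_stepA_shift (x : Int) (rest : List Int) (s : List Int) (m : Int) (hm : 0 ≤ m) :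
    (PySem.List.pyRange m (-1) (-1)).foldl (stepA (x :: rest)) s =
      stepA (x :: rest)
        ((PySem.List.pyRange (m - 1) (-1) (-1)).foldl (stepA rest) s) 0 := by
  rw [pyRange_countdown_split m hm, List.foldl_append, List.foldl_map]
  simp only [List.foldl_cons, List.foldl_nil]
  congr 1
  refine PySem.List.foldl_congr_mem _ _ _ _ (fun acc j hj => ?_)
  have hj0 : (0 : Int) ≤ j := by
    rcases (PySem.List.mem_pyRange_neg_one).mp hj with ⟨h1, _⟩
    omega
  exact stepA_cons_shift _ _ _ _ hj0

-- A's recursion: the loop on x :: rest performs rest's loop and then one step with x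
theorem a_rec (x y : Int) (tl : List Int) :
    allSumsDP (x :: y :: tl) =
      PySem.Set.add
        ((PySem.Set.ofList (allSumsDP (y :: tl))).foldl
          (fun h j => PySem.Set.add h (x + j)) (allSumsDP (y :: tl))) x := by
  rw [allSumsDP_eq_foldl, allSumsDP_eq_foldl]
  have hm : ((x :: y :: tl).length : Int) - 2 = ((y :: tl).length : Int) - 1 := by
    simp only [List.length_cons]; push_cast; ring
  have hinit : PySem.List.pyGetD (x :: y :: tl) (((x :: y :: tl).length : Int) - 1) 0
      = PySem.List.pyGetD (y :: tl) (((y :: tl).length : Int) - 1) 0 := by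
    have h1 : ((x :: y :: tl).length : Int) - 1 = (((y :: tl).length : Int) - 1) + 1 := by
      simp only [List.length_cons]; push_cast; ring
    rw [h1, pyGetD_cons_shift _ _ _ (by simp only [List.length_cons]; push_cast; omega)]
  rw [hm, hinit, foldl_stepA_shift x (y :: tl) _ _ (by simp only [List.length_cons]; push_cast; omega),
    show ((y :: tl).length : Int) - 1 - 1 = ((y :: tl).length : Int) - 2 by ring,
    stepA_zero]

-- A = B on every nonempty list
theorem a_eq_b : ∀ (arr : List Int), arr ≠ [] → allSumsDP arr = allSumsDP_alt arr := by
  intro arr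
  induction arr with
  | nil => intro h; exact absurd rfl h
  | cons x tl ih =>
    intro _
    cases tl with
    | nil =>
      show allSumsDP [x] = allSumsDP_alt [x]
      rw [allSumsDP_eq_foldl]
      simp [allSumsDP_alt, PySem.List.pyRange_neg_one_eq_nil, PySem.List.pyGetD]
    | cons y tl' =>
      rw [a_rec, ih (by simp),
        PySem.Set.ofList_eq_self_of_nodup _ (nodup_alt (y :: tl')), alt_cons]
      exact PySem.Set.add_of_mem
        ((PySem.Set.mem_foldl_add _ _ _ _).mpr (Or.inr ⟨0, zero_mem_alt _, by ring⟩))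

-- ===== VERDICT (by name: the statement is the Claim_ definition above) =====
theorem allSumsDP_spec : Claim_equal_allSumsDP := by
  intro arr _ hpre
  exact a_eq_b arr hpre
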